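-- pv_equiv track=rewrite | github.com/k4232233/diff-auto-mator | diff_auto_mator/test_demo/test_extract_base_name.py | extract_base_name
-- ===== SOURCE A (Python) =====
-- def extract_base_name(jar_name):
--     # 分离文件名和扩展名
--
--     name_part = jar_name[:-4]  # 去掉 .jar 扩展名
--
--     # 按 '-' 分割
--
--     parts = name_part.split('-')
--
--     # 从后往前判断，连续的部分如果看起来像版本号就跳过
--
--     # 版本号通常是数字和点的组合，如 '1', '14', '1.12', '1.12.6.0' 等
--
--     i = len(parts) - 1
--
--     while i >= 0:
--
--         part = parts[i]
--
--         # 检查是否是版本号：包含数字，且可能包含点号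
--
--         if any(c.isdigit() for c in part) and all(c.isdigit() or c == '.' for c in part):
--
--             # 继续向前检查
--
--             i -= 1
--
--         else:
--
--             # 找到了非版本部分，停止
--
--             break
--
--     # 非版本部分的索引范围是 0 到 i（包含i）
--
--     if i >= 0:
--         non_version_parts = parts[:i + 1]
--
--         base_name = '-'.join(non_version_parts)
--
--         return base_name
--
--     # 如果所有部分都被认为是版本号，则返回原名
--
--     return name_part
-- ===== SOURCE B (Python) =====
-- def extract_base_name(jar_name):
--     name_part = jar_name[:-4]
--     acc = ""
--     first = True
--     result = None
--     for part in name_part.split('-'):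
--         acc = part if first else acc + '-' + part
--         first = False
--         if not (any(c.isdigit() for c in part) and all(c.isdigit() or c == '.' for c in part)):
--             result = acc
--     return name_part if result is None else result
-- ===== Notes on version B (the rewrite author's own statement) =====
-- stated objective: alternative
-- what changed: Replaces A's backward index scan that slices the parts list and joins it at the end by a single forward pass that builds the joined string incrementally and records it at every non-version part.
import Mathlib
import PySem

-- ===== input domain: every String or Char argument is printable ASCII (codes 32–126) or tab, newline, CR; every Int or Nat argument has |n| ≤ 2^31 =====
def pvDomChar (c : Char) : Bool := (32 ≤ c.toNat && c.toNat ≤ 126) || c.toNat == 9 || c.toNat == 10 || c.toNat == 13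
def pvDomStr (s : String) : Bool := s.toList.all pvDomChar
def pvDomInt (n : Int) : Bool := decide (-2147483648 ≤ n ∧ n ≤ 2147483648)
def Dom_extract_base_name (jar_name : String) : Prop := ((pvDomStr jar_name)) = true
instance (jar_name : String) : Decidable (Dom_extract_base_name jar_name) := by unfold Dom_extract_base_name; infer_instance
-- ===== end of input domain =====

-- B replaces A's backward index scan + list slice + join by one forward pass that builds the
-- joined string incrementally and remembers it at each non-version part (objective: alternative).

-- ===== PORT A =====
-- part looks like a version: any char a digit AND every char a digit or '.'
-- (Python c.isdigit() = Char.isDigit on the printable-ASCII domain)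
def pvIsVerA (p : List Char) : Bool :=
  p.any (fun c => c.isDigit) && p.all (fun c => c.isDigit || c == '.')

-- the 'while i >= 0' loop: argument n encodes i = n - 1 (n = 0 means i = -1); returns final i
def pvScanA (parts : List (List Char)) : Nat → Int
  | 0 => -1
  | n + 1 => if pvIsVerA (parts.getD n []) then pvScanA parts n else (n : Int)

def extract_base_name (jar_name : String) : String :=
  let name_part := PySem.List.slice jar_name.toList none (some (-4))
  let parts := PySem.Chars.splitOn name_part ['-']
  let i := pvScanA parts parts.length
  if i ≥ 0 then
    String.ofList (PySem.Chars.join ['-'] (PySem.List.slice parts none (some (i + 1))))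
  else
    String.ofList name_part

-- ===== PORT B =====
-- loop body of B: state = (acc, first, result); the version test is inline as in B's source
def pvStepB (st : List Char × Bool × Option (List Char)) (part : List Char) :
    List Char × Bool × Option (List Char) :=
  let acc := if st.2.1 then part else st.1 ++ '-' :: part
  (acc, false, if !(part.any (fun c => c.isDigit) && part.all (fun c => c.isDigit || c == '.')) then some acc else st.2.2)

def extract_base_name_alt (jar_name : String) : String :=
  let name_part := PySem.List.slice jar_name.toList none (some (-4))
  let st := (PySem.Chars.splitOn name_part ['-']).foldl pvStepB ([], true, none)
  String.ofList (st.2.2.getD name_part)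

-- ===== PRECONDITION & SPEC =====
def Spec_extract_base_name (jar_name : String) (out : String) : Prop := out = extract_base_name_alt jar_name
instance (jar_name : String) (out : String) : Decidable (Spec_extract_base_name jar_name out) := by unfold Spec_extract_base_name; infer_instance

-- ===== CLAIM (what is proved, stated in full; the proofs are below) =====
def Claim_equal_extract_base_name : Prop := ∀ (jar_name : String), Dom_extract_base_name jar_name → Spec_extract_base_name jar_name (extract_base_name jar_name)

-- ===== LEMMAS AND PROOFS =====

-- the backward scan only inspects indices below n
theorem pvScanA_append (xs : List (List Char)) (p : List Char) (n : Nat) (h : n ≤ xs.length) :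
    pvScanA (xs ++ [p]) n = pvScanA xs n := by
  induction n with
  | zero => rfl
  | succ k ih =>
    have hk : k < xs.length := by omega
    simp [pvScanA, List.getD, List.getElem?_append_left hk, ih (by omega)]

-- the scan result is strictly below its starting bound
theorem pvScanA_lt (xs : List (List Char)) (n : Nat) : pvScanA xs n < (n : Int) := by
  induction n with
  | zero => simp [pvScanA]
  | succ k ih =>
    simp only [pvScanA]
    split
    · exact lt_trans ih (by push_cast; omega)
    · push_cast; omega

-- what A returns as an Option: the joined prefix up to the scan boundary, none if all parts version-like
def pvRes (ps : List (List Char)) : Option (List Char) :=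
  if pvScanA ps ps.length ≥ 0 then
    some (PySem.Chars.join ['-'] (List.take (pvScanA ps ps.length + 1).toNat ps))
  else none

-- joining after appending one more part
theorem pvJoin_snoc (ps : List (List Char)) (p : List Char) :
    PySem.Chars.join ['-'] (ps ++ [p])
      = if ps.isEmpty then p else PySem.Chars.join ['-'] ps ++ '-' :: p := by
  induction ps with
  | nil => simp [PySem.Chars.join_singleton]
  | cons x xs ih =>
    cases xs with
    | nil => simp [PySem.Chars.join_cons_cons, PySem.Chars.join_singleton]
    | cons y ys =>
      simp only [List.cons_append, PySem.Chars.join_cons_cons, List.isEmpty_cons] at *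
      simp [ih]

-- B's fold computes (join of all parts, emptiness flag, A's boundary result)
theorem pvFoldB_spec (ps : List (List Char)) :
    ps.foldl pvStepB ([], true, none)
      = (PySem.Chars.join ['-'] ps, ps.isEmpty, pvRes ps) := by
  induction ps using List.reverseRecOn with
  | nil => simp [PySem.Chars.join_nil, pvRes, pvScanA]
  | append_singleton xs p ih =>
    rw [List.foldl_append, ih]
    have hscan : pvScanA (xs ++ [p]) (xs ++ [p]).length
        = if pvIsVerA p then pvScanA xs xs.length else (xs.length : Int) := by
      have hget : (xs ++ [p]).getD xs.length [] = p := by simp [List.getD]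
      simp only [List.length_append, List.length_singleton, pvScanA, hget,
        pvScanA_append xs p xs.length le_rfl]
    simp only [List.foldl_cons, List.foldl_nil]
    unfold pvStepB
    simp only [Prod.mk.injEq]
    by_cases hv : pvIsVerA p
    · have hvB : (p.any (fun c => c.isDigit) && p.all (fun c => c.isDigit || c == '.')) = true := hv
      -- kept part: result unchanged
      refine ⟨by simp [pvJoin_snoc], by simp, ?_⟩
      unfold pvRes
      rw [hscan, if_pos hv]
      by_cases hi : pvScanA xs xs.length ≥ 0
      · have hlt := pvScanA_lt xs xs.length
        have htak : (pvScanA xs xs.length + 1).toNat ≤ xs.length := by omega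
        simp [hvB, hi, List.take_append_of_le_length htak]
      · simp [hvB, hi]
    · have hvB : (p.any (fun c => c.isDigit) && p.all (fun c => c.isDigit || c == '.')) = false := Bool.eq_false_iff.mpr hv
      refine ⟨by simp [pvJoin_snoc], by simp, ?_⟩
      unfold pvRes
      rw [hscan, if_neg hv]
      have htak : ((xs.length : Int) + 1).toNat = xs.length + 1 := by omega
      have hall : List.take (xs.length + 1) (xs ++ [p]) = xs ++ [p] := by
        apply List.take_of_length_le; simp
      simp [hvB, htak, hall, pvJoin_snoc, List.isEmpty_iff]

-- ===== VERDICT (by name: the statement is the Claim_ definition above) =====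
theorem extract_base_name_spec : Claim_equal_extract_base_name := by
  intro jar_name _
  show extract_base_name jar_name = extract_base_name_alt jar_name
  unfold extract_base_name extract_base_name_alt
  simp only [pvFoldB_spec]
  set name_part := PySem.List.slice jar_name.toList none (some (-4))
  set ps := PySem.Chars.splitOn name_part ['-'] with hps
  unfold pvRes
  by_cases hi : pvScanA ps ps.length ≥ 0
  · rw [if_pos hi, if_pos hi]
    simp [PySem.List.slice_to ps (by omega : (0:Int) ≤ pvScanA ps ps.length + 1)]
  · rw [if_neg hi, if_neg hi]
    rfl
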